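-- pv_equiv track=rewrite | github.com/egor293/education | Combinatorics_or_Book_Tasks/min_polindrome_6.5.py | polindrome
-- ===== SOURCE A (Python) =====
-- from typing import Counter
--
-- def polindrome(pol):
--     a=Counter(pol)
--     pol=sorted(list(set(pol)))
--     min_pol=[]
--     b=False
--     i=0
--     for _ in range(len(pol)):
--         if a[pol[_]]>=2:
--             min_pol.insert(i,pol[_]*(a[pol[_]]//2))
--             min_pol.insert(-(i+1),pol[_]*(a[pol[_]]//2))
--             i+=1
--         if b==False and a[pol[_]]%2!=0:
--             c=pol[_]
--             b=True
--     if b==True: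
--         min_pol.insert(len(min_pol)//2,c)
--     return ''.join(min_pol)
-- ===== SOURCE B (Python) =====
-- from typing import Counter
--
-- def polindrome(pol):
--     a = Counter(pol)
--     chars = sorted(set(pol))
--     half = ''.join(ch * (a[ch] // 2) for ch in chars)
--     mid = next((ch for ch in chars if a[ch] % 2 != 0), '')
--     return half + mid + half[::-1]
-- ===== Notes on version B (the rewrite author's own statement) =====
-- stated objective: simpler
-- what changed: Builds the left half once as a string and mirrors it (half + middle + reversed half) instead of A's interleaved list.insert at both ends with a running index and a flag-tracked middle insertion.
import Mathlib
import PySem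

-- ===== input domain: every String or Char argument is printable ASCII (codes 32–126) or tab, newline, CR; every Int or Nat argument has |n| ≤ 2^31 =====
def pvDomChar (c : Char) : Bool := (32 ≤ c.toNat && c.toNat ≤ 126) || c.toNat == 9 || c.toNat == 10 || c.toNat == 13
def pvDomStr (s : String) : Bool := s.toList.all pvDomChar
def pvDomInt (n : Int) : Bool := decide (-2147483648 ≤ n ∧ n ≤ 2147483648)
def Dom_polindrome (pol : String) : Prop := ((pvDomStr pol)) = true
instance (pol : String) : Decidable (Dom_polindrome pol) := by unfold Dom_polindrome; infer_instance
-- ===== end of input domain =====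

-- B builds the left half once and mirrors it (half + middle + reversed half); A interleaves
-- list.insert at both ends with a running index — same return value, simpler decomposition.

-- ===== PORT A =====
-- one loop iteration of A's `for _ in range(len(pol))` body, state (min_pol, b, c, i)
def stepA (a : PySem.Dict Char Int) (st : List (List Char) × Bool × Char × Int) (ch : Char) :
    List (List Char) × Bool × Char × Int :=
  let mp := st.1; let b := st.2.1; let c := st.2.2.1; let i := st.2.2.2
  let cnt := a.getD ch 0
  let (mp, i) :=
    if 2 ≤ cnt then
      (PySem.List.insert
         (PySem.List.insert mp i (PySem.List.pyRepeat [ch] (PySem.Int.floordiv cnt 2)))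
         (-(i + 1)) (PySem.List.pyRepeat [ch] (PySem.Int.floordiv cnt 2)),
       i + 1)
    else (mp, i)
  let (b, c) := if b = false ∧ PySem.Int.mod cnt 2 ≠ 0 then (true, ch) else (b, c)
  (mp, b, c, i)

def polindrome (pol : String) : String :=
  let a := PySem.Dict.counter pol.toList
  let pol2 := PySem.List.sorted (PySem.Set.ofList pol.toList) (fun x => x) false
  let st := pol2.foldl (stepA a) ([], false, ' ', 0)
  let mp := st.1
  let mp := if st.2.1 = true then
      PySem.List.insert mp (PySem.Int.floordiv (mp.length : Int) 2) [st.2.2.1]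
    else mp
  String.ofList (PySem.Chars.join [] mp)

-- ===== PORT B =====
def polindrome_alt (pol : String) : String :=
  let a := PySem.Dict.counter pol.toList
  let chars := PySem.List.sorted (PySem.Set.ofList pol.toList) (fun x => x) false
  let half := PySem.Chars.join []
    (chars.map (fun ch => PySem.List.pyRepeat [ch] (PySem.Int.floordiv (a.getD ch 0) 2)))
  let mid := match chars.find? (fun ch => PySem.Int.mod (a.getD ch 0) 2 != 0) with
    | some ch => [ch]
    | none => []
  String.ofList (half ++ mid ++ half.reverse)

-- ===== PRECONDITION & SPEC =====
def Spec_polindrome (pol : String) (out : String) : Prop := out = polindrome_alt pol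
instance (pol : String) (out : String) : Decidable (Spec_polindrome pol out) := by unfold Spec_polindrome; infer_instance

-- ===== CLAIM (what is proved, stated in full; the proofs are below) =====
def Claim_equal_polindrome : Prop := ∀ (pol : String), Dom_polindrome pol → Spec_polindrome pol (polindrome pol)

-- ===== LEMMAS AND PROOFS =====

-- Python list.insert at a negative index -j (0 < j ≤ len) inserts before position len - j
lemma insert_neg {α : Type} (xs : List α) (j : Nat) (v : α) (h1 : 0 < j) (h2 : j ≤ xs.length) :
    PySem.List.insert xs (-(j : Int)) v =
      List.take (xs.length - j) xs ++ v :: List.drop (xs.length - j) xs := by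
  simp only [PySem.List.insert, PySem.List.sliceIndices]
  norm_num
  split_ifs
  have hm : (max (-(j : Int) + ↑xs.length) 0).toNat = xs.length - j := by omega
  rw [hm]

-- ''.join of a list of character chunks is their concatenation
lemma join_nil_eq_flatten (l : List (List Char)) : PySem.Chars.join [] l = l.flatten := by
  induction l with
  | nil => rfl
  | cons a l ih =>
    cases l with
    | nil => simp [PySem.Chars.join, List.intercalate, List.intersperse]
    | cons b t => simp_all [PySem.Chars.join, List.intercalate, List.intersperse]

-- invariant of A's for-loop: min_pol is always (chunks so far) ++ its mirror, i its length,
-- and (b, c) track the first odd-count character seen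
lemma loopA_inv (a : PySem.Dict Char Int) (cs : List Char) (L : List (List Char)) (b : Bool) (c : Char) :
    cs.foldl (stepA a) (L ++ L.reverse, b, c, (L.length : Int)) =
      (let M := L ++ (cs.filter (fun ch => decide (2 ≤ a.getD ch 0))).map
          (fun ch => PySem.List.pyRepeat [ch] (PySem.Int.floordiv (a.getD ch 0) 2))
       (M ++ M.reverse,
        b || cs.any (fun ch => PySem.Int.mod (a.getD ch 0) 2 != 0),
        (if b then c else ((cs.find? (fun ch => PySem.Int.mod (a.getD ch 0) 2 != 0)).getD c)),
        (M.length : Int))) := by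
  induction cs generalizing L b c with
  | nil => simp
  | cons ch cs ih =>
    set x := PySem.List.pyRepeat [ch] (PySem.Int.floordiv (a.getD ch 0) 2) with hx
    by_cases h2 : 2 ≤ a.getD ch 0
    · have e1 : PySem.List.insert (L ++ L.reverse) (L.length : Int) x
          = L ++ x :: L.reverse := by
        rw [PySem.List.insert_natCast _ _ _ (by simp)]
        simp
      have e2 : PySem.List.insert (L ++ x :: L.reverse) (-((L.length : Int) + 1)) x
          = L ++ x :: x :: L.reverse := by
        have hc : -((L.length : Int) + 1) = -(((L.length + 1 : Nat)) : Int) := by push_cast; ring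
        rw [hc, insert_neg _ _ _ (by omega) (by simp)]
        have hl : (L ++ x :: L.reverse).length - (L.length + 1) = L.length := by simp
        rw [hl]
        simp
      have hstep : stepA a (L ++ L.reverse, b, c, (L.length : Int)) ch =
          ((L ++ [x]) ++ (L ++ [x]).reverse,
           b || (PySem.Int.mod (a.getD ch 0) 2 != 0),
           (if b = false ∧ PySem.Int.mod (a.getD ch 0) 2 ≠ 0 then ch else c),
           (((L ++ [x]).length : Nat) : Int)) := by
        simp only [stepA, ← hx, if_pos h2, e1, e2]
        rcases Int.emod_two_eq (a.getD ch 0) with hodd | hodd <;> cases b <;>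
          simp [hodd, List.append_assoc]
      rw [List.foldl_cons, hstep, ih]
      simp only [List.filter_cons, if_pos, h2, decide_true, List.map_cons]
      refine Prod.ext ?_ (Prod.ext ?_ (Prod.ext ?_ ?_)) <;>
        rcases Int.emod_two_eq (a.getD ch 0) with hodd | hodd <;> cases b <;>
          simp [hodd, List.append_assoc, hx]
    · have hstep : stepA a (L ++ L.reverse, b, c, (L.length : Int)) ch =
          (L ++ L.reverse,
           b || (PySem.Int.mod (a.getD ch 0) 2 != 0),
           (if b = false ∧ PySem.Int.mod (a.getD ch 0) 2 ≠ 0 then ch else c),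
           ((L.length : Nat) : Int)) := by
        simp only [stepA, ← hx, if_neg h2]
        rcases Int.emod_two_eq (a.getD ch 0) with hodd | hodd <;> cases b <;>
          simp [hodd]
      rw [List.foldl_cons, hstep, ih]
      simp only [List.filter_cons, h2, decide_false]
      refine Prod.ext ?_ (Prod.ext ?_ (Prod.ext ?_ ?_)) <;>
        rcases Int.emod_two_eq (a.getD ch 0) with hodd | hodd <;> cases b <;>
          simp [hodd]

-- concatenating mirror-symmetric chunks in reverse order reverses the concatenation
lemma flatten_reverse_of (M : List (List Char)) (h : ∀ y ∈ M, y.reverse = y) :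
    M.reverse.flatten = M.flatten.reverse := by
  induction M with
  | nil => simp
  | cons y M ih =>
    simp only [List.reverse_cons, List.flatten_append, List.flatten_cons, List.flatten_nil]
    rw [ih (fun z hz => h z (List.mem_cons_of_mem _ hz))]
    simp [h y List.mem_cons_self]

-- chunks of characters occurring once are empty, so filtering them out keeps the concatenation
lemma flatten_map_filter (a : PySem.Dict Char Int) (l : List Char)
    (h : ∀ ch ∈ l, ¬(2 ≤ a.getD ch 0) →
      PySem.List.pyRepeat [ch] (PySem.Int.floordiv (a.getD ch 0) 2) = []) :
    (((l.filter (fun ch => decide (2 ≤ a.getD ch 0))).map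
        (fun ch => PySem.List.pyRepeat [ch] (PySem.Int.floordiv (a.getD ch 0) 2))).flatten : List Char)
      = ((l.map (fun ch => PySem.List.pyRepeat [ch] (PySem.Int.floordiv (a.getD ch 0) 2))).flatten) := by
  induction l with
  | nil => rfl
  | cons ch l ih =>
    by_cases h2 : 2 ≤ a.getD ch 0
    · simp only [List.filter_cons, h2, decide_true, if_true, List.map_cons, List.flatten_cons]
      rw [ih (fun d hd => h d (List.mem_cons_of_mem _ hd))]
    · simp only [List.filter_cons, h2, decide_false, List.map_cons, List.flatten_cons,
        h ch (List.mem_cons_self) h2, List.nil_append]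
      exact ih (fun d hd => h d (List.mem_cons_of_mem _ hd))

-- ===== VERDICT (by name: the statement is the Claim_ definition above) =====
theorem polindrome_spec : Claim_equal_polindrome := by
  unfold Claim_equal_polindrome Spec_polindrome
  intro pol _
  simp only [polindrome, polindrome_alt]
  set a := PySem.Dict.counter pol.toList with ha
  set chars := PySem.List.sorted (PySem.Set.ofList pol.toList) (fun x => x) false with hchars
  set chunk : Char → List Char :=
    (fun ch => PySem.List.pyRepeat [ch] (PySem.Int.floordiv (a.getD ch 0) 2)) with hchunk
  set M := (chars.filter (fun ch => decide (2 ≤ a.getD ch 0))).map chunk with hM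
  -- evaluate A's loop via the invariant (L = [])
  have hloop := loopA_inv a chars ([]) false ' '
  simp only [List.nil_append, List.reverse_nil, List.length_nil, Nat.cast_zero] at hloop
  rw [hloop]
  simp only [← hchunk, ← hM]
  -- every chunk is a palindrome block (a replicate), so mirroring M reverses its flatten
  have hpal : ∀ y ∈ M, y.reverse = y := by
    intro y hy
    rw [hM] at hy
    rcases List.mem_map.mp hy with ⟨ch, _, rfl⟩
    rw [hchunk]
    simp [PySem.List.pyRepeat_singleton, List.reverse_replicate]
  -- characters with a single occurrence contribute empty chunks
  have hone : ∀ ch ∈ chars, ¬(2 ≤ a.getD ch 0) → chunk ch = [] := by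
    intro ch hch h2
    have hmem : ch ∈ pol.toList := by
      rw [hchars] at hch
      exact (PySem.Set.mem_ofList _ _).mp ((PySem.List.mem_sorted _ _ _ _).mp hch)
    have hcnt : a.getD ch 0 = (List.count ch pol.toList : Int) := by
      rw [ha]; exact PySem.Dict.getD_counter _ _
    have hpos : 0 < List.count ch pol.toList := List.count_pos_iff.mpr hmem
    have h1 : List.count ch pol.toList = 1 := by rw [hcnt] at h2; omega
    rw [hchunk]
    simp [hcnt, h1, PySem.List.pyRepeat_singleton]
  have hhalf : (chars.map chunk).flatten = M.flatten := by
    rw [hM, hchunk]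
    exact (flatten_map_filter a chars hone).symm
  -- the two results
  cases hfind : chars.find? (fun ch => PySem.Int.mod (a.getD ch 0) 2 != 0) with
  | none =>
    have hany : chars.any (fun ch => PySem.Int.mod (a.getD ch 0) 2 != 0) = false := by
      rw [List.any_eq_false]
      intro ch hch
      simpa using List.find?_eq_none.mp hfind ch hch
    simp only [hany, Bool.false_or, Bool.false_eq_true, if_false]
    rw [join_nil_eq_flatten, join_nil_eq_flatten]
    congr 1
    rw [List.flatten_append, flatten_reverse_of M hpal, hhalf]
    simp
  | some w =>
    have hany : chars.any (fun ch => PySem.Int.mod (a.getD ch 0) 2 != 0) = true := by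
      rw [List.any_eq_true]
      refine ⟨w, List.mem_of_find?_eq_some hfind, ?_⟩
      exact List.find?_some (p := fun ch => PySem.Int.mod (a.getD ch 0) 2 != 0) hfind
    simp only [hany, Bool.false_or, Bool.false_eq_true, if_false, if_true, Option.getD_some]
    have e3 : PySem.List.insert (M ++ M.reverse)
        (PySem.Int.floordiv (((M ++ M.reverse).length : Nat) : Int) 2) [w]
        = M ++ [w] :: M.reverse := by
      have hlen : ((M ++ M.reverse).length : Nat) = 2 * M.length := by simp; ring
      have hdiv : PySem.Int.floordiv (((M ++ M.reverse).length : Nat) : Int) 2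
          = (M.length : Int) := by
        rw [hlen]
        have h22 : ((2 : Nat) : Int) = (2 : Int) := by norm_num
        rw [← h22, PySem.Int.floordiv_natCast]
        norm_num
      rw [hdiv, PySem.List.insert_natCast _ _ _ (by simp)]
      simp
    rw [e3, join_nil_eq_flatten, join_nil_eq_flatten]
    congr 1
    rw [List.flatten_append, List.flatten_cons, flatten_reverse_of M hpal, hhalf]
    simp
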